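-- pv_equiv track=rewrite | github.com/Routstr/sixty-nuts | sixty_nuts/denominations.py | _default_split
-- ===== SOURCE A (Python) =====
-- def _default_split(amount: int) -> dict[int, int]:
--     """Default split using powers of 2."""
--     denominations = {}
--     remaining = amount
--
--     # Standard powers of 2
--     for denom in [
--         16384,
--         8192,
--         4096,
--         2048,
--         1024,
--         512,
--         256,
--         128,
--         64,
--         32,
--         16,
--         8,
--         4,
--         2,
--         1,
--     ]:
--         if remaining >= denom:
--             count = remaining // denom
--             denominations[denom] = count
--             remaining -= denom * count
--
--     return denominations
-- ===== SOURCE B (Python) =====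
-- def _default_split(amount: int) -> dict[int, int]:
--     """Default split using powers of 2, computed by recursive halving of the amount."""
--     def go(n: int, denom: int) -> dict[int, int]:
--         if n < 1:
--             return {}
--         if denom == 16384:
--             return {denom: n}
--         result = go(n // 2, denom * 2)
--         if n % 2:
--             result[denom] = 1
--         return result
--     return go(amount, 1)
-- ===== Notes on version B (the rewrite author's own statement) =====
-- stated objective: alternative
-- what changed: Replaces A's iteration over a fixed denomination list with running-remainder greedy subtraction by a recursion that halves the amount: each recursion level contributes a single-count entry for its parity bit and the largest-denomination base case takes the whole remaining quotient.
import Mathlib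
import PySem

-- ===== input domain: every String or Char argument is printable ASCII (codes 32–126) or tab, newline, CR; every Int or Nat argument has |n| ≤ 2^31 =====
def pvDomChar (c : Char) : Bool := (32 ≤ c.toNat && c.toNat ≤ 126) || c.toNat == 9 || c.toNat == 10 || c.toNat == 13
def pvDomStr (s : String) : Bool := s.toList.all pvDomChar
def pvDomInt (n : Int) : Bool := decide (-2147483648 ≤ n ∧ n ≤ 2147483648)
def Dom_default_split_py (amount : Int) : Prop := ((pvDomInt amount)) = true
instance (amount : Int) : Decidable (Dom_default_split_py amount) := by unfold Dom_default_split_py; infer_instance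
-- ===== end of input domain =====

-- B replaces A's loop over a fixed denomination list (running-remainder greedy subtraction)
-- by a recursion that halves the amount, emitting one parity bit per level and the whole
-- quotient at the largest-denomination base case (objective: alternative; same cost).

-- ===== PORT A =====
def denomsA : List Int := [16384, 8192, 4096, 2048, 1024, 512, 256, 128, 64, 32, 16, 8, 4, 2, 1]

def stepA (st : PySem.Dict Int Int × Int) (denom : Int) : PySem.Dict Int Int × Int :=
  if st.2 ≥ denom then
    let count := PySem.Int.floordiv st.2 denom
    (st.1.insert denom count, st.2 - denom * count)
  else st

def default_split_py (amount : Int) : List (Int × Int) :=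
  ((denomsA.foldl stepA (PySem.Dict.empty, amount)).1).items

-- ===== PORT B =====
-- go(n, denom): recursion terminates because n // 2 < n whenever 1 ≤ n.
def go_split (n : Int) (denom : Int) : PySem.Dict Int Int :=
  if n < 1 then PySem.Dict.empty
  else if denom = 16384 then PySem.Dict.empty.insert denom n
  else
    let result := go_split (PySem.Int.floordiv n 2) (denom * 2)
    if PySem.Int.mod n 2 ≠ 0 then result.insert denom 1 else result
termination_by n.toNat
decreasing_by
  rw [PySem.Int.floordiv_eq_ediv_of_pos (by norm_num : (0:Int) < 2)]
  omega

def default_split_py_alt (amount : Int) : List (Int × Int) :=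
  (go_split amount 1).items

-- ===== PRECONDITION & SPEC =====
def Spec_default_split_py (amount : Int) (out : List (Int × Int)) : Prop := out = default_split_py_alt amount
instance (amount : Int) (out : List (Int × Int)) : Decidable (Spec_default_split_py amount out) := by unfold Spec_default_split_py; infer_instance

-- ===== CLAIM (what is proved, stated in full; the proofs are below) =====
def Claim_equal_default_split_py : Prop := ∀ (amount : Int), Dom_default_split_py amount → Spec_default_split_py amount (default_split_py amount)

-- ===== LEMMAS AND PROOFS =====

-- the tail [8192, …, 1] of A's denomination list, generically
def pows : Nat → List Int
  | 0 => []
  | k + 1 => ((2:Int) ^ k) :: pows k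

-- what A's tail fold appends to the dict, as a function of the running remainder
def entries : Nat → Int → List (Int × Int)
  | 0, _ => []
  | k + 1, r => if (2:Int) ^ k ≤ r then ((2:Int) ^ k, 1) :: entries k (r - 2 ^ k) else entries k r

-- the low-order bits of n (keys 2^0 … 2^(k-1)), high bit first — what B's recursion emits
def bitsLow : Nat → Int → List (Int × Int)
  | 0, _ => []
  | k + 1, n =>
      (bitsLow k (n / 2)).map (fun p => (2 * p.1, p.2)) ++ (if n % 2 ≠ 0 then [((1:Int), (1:Int))] else [])

lemma dict_empty_items : (PySem.Dict.empty : PySem.Dict Int Int).items = [] := rfl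

lemma bitsLow_zero (k : Nat) : bitsLow k 0 = [] := by
  induction k with
  | zero => rfl
  | succ k ih => simp [bitsLow, ih]

lemma denomsA_eq : denomsA = 16384 :: pows 14 := by norm_num [denomsA, pows]

lemma pow_ne_pow_of_lt {j k : Nat} (h : j < k) : ((2:Int) ^ j) ≠ (2:Int) ^ k :=
  ne_of_lt (pow_lt_pow_right₀ one_lt_two h)

lemma count_one (k : Nat) (r : Int) (h1 : (2:Int) ^ k ≤ r) (h2 : r < 2 ^ (k + 1)) :
    PySem.Int.floordiv r ((2:Int) ^ k) = 1 := by
  rw [PySem.Int.floordiv_eq_iff_of_pos (by positivity)]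
  constructor
  · simpa using h1
  · rw [pow_succ] at h2; linarith

lemma entries_nil (k : Nat) (r : Int) (h : r ≤ 0) : entries k r = [] := by
  induction k with
  | zero => rfl
  | succ k ih =>
      have : ¬ ((2:Int) ^ k ≤ r) := by
        have : (0:Int) < 2 ^ k := by positivity
        omega
      simp [entries, this, ih]

lemma foldA_items (k : Nat) (d : PySem.Dict Int Int) (r : Int) (hr : r < 2 ^ k)
    (hd : ∀ j, j < k → d.contains ((2:Int) ^ j) = false) :
    (((pows k).foldl stepA (d, r)).1).items = d.items ++ entries k r := by
  induction k generalizing d r with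
  | zero => simp [pows, entries]
  | succ k ih =>
      rw [pows, List.foldl_cons]
      by_cases hc : (2:Int) ^ k ≤ r
      · have hcnt : PySem.Int.floordiv r ((2:Int) ^ k) = 1 := count_one k r hc hr
        have hcnt' : r / (2:Int) ^ k = 1 := by
          rw [← PySem.Int.floordiv_eq_ediv_of_pos (by positivity : (0:Int) < 2 ^ k)]; exact hcnt
        have hst : stepA (d, r) ((2:Int) ^ k) = (d.insert ((2:Int) ^ k) 1, r - 2 ^ k) := by
          simp [stepA, hc, hcnt']
        rw [hst]
        have hfresh : d.contains ((2:Int) ^ k) = false := hd k (Nat.lt_succ_self k)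
        have hr' : r - 2 ^ k < 2 ^ k := by rw [pow_succ] at hr; linarith
        have hd' : ∀ j, j < k → (d.insert ((2:Int) ^ k) 1).contains ((2:Int) ^ j) = false := by
          intro j hj
          rw [PySem.Dict.contains_insert]
          simp [hd j (Nat.lt_succ_of_lt hj), pow_ne_pow_of_lt hj]
        rw [ih _ _ hr' hd', PySem.Dict.items_insert_of_not_contains _ _ hfresh]
        simp [entries, hc]
      · have hst : stepA (d, r) ((2:Int) ^ k) = (d, r) := by simp [stepA, hc]
        rw [hst, ih _ _ (by omega) (fun j hj => hd j (Nat.lt_succ_of_lt hj))]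
        simp [entries, hc]

-- peeling the LOW bit of the argument of A's high-bit-first `entries`
lemma entries_double (k : Nat) (r b : Int) (hr0 : 0 ≤ r) (hrk : r < 2 ^ k)
    (hb : b = 0 ∨ b = 1) :
    entries (k + 1) (2 * r + b)
      = (entries k r).map (fun p => (2 * p.1, p.2)) ++ (if b ≠ 0 then [((1:Int), (1:Int))] else []) := by
  induction k generalizing r with
  | zero =>
      have hr : r = 0 := by omega
      subst hr
      rcases hb with hb | hb <;> subst hb <;> simp [entries]
  | succ k ih =>
      by_cases hc : (2:Int) ^ k ≤ r
      · have hc2 : (2:Int) ^ (k + 1) ≤ 2 * r + b := by rw [pow_succ]; omega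
        have hsub : 2 * r + b - 2 ^ (k + 1) = 2 * (r - 2 ^ k) + b := by rw [pow_succ]; ring
        rw [show k + 1 + 1 = (k + 1) + 1 from rfl, entries, if_pos hc2, hsub,
            ih (r - 2 ^ k) (by omega) (by rw [pow_succ] at hrk; omega)]
        rw [entries, if_pos hc]
        simp [pow_succ]; ring_nf
      · have hc2 : ¬ ((2:Int) ^ (k + 1) ≤ 2 * r + b) := by rw [pow_succ]; omega
        rw [show k + 1 + 1 = (k + 1) + 1 from rfl, entries, if_neg hc2,
            ih r hr0 (by omega)]
        rw [entries, if_neg hc]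

lemma entries_eq_bitsLow (k : Nat) (n : Int) (hn : 0 ≤ n) :
    entries k (n % 2 ^ k) = bitsLow k n := by
  induction k generalizing n with
  | zero => simp [entries, bitsLow]
  | succ k ih =>
      have hsplit : n % 2 ^ (k + 1) = 2 * (n / 2 % 2 ^ k) + n % 2 := by
        have h1 : n / 2 % 2 ^ k = n / 2 - 2 ^ k * (n / 2 / 2 ^ k) := by
          rw [Int.emod_def]
        have h2 : n / 2 / 2 ^ k = n / 2 ^ (k + 1) := by
          rw [Int.ediv_ediv_of_nonneg (by positivity), pow_succ']
        have h3 : n % 2 ^ (k + 1) = n - 2 ^ (k + 1) * (n / 2 ^ (k + 1)) := by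
          rw [Int.emod_def]
        have h4 : 2 * (n / 2) + n % 2 = n := by omega
        rw [h1, h2, h3, pow_succ]
        ring_nf
        omega
      rw [hsplit,
          entries_double k (n / 2 % 2 ^ k) (n % 2) (Int.emod_nonneg _ (by positivity))
            (Int.emod_lt_of_pos _ (by positivity)) (by omega),
          ih (n / 2) (by omega)]
      rw [bitsLow]

-- characterisation of B's recursion: top bucket = quotient, lower entries = scaled low bits
lemma go_split_items (k : Nat) (hk : k ≤ 14) (d : Int) (hd : d = 2 ^ (14 - k)) (n : Int)
    (hn : 0 ≤ n) :
    (go_split n d).items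
        = (if 1 ≤ n / 2 ^ k then [((16384:Int), n / 2 ^ k)] else []) ++
            (bitsLow k n).map (fun p => (d * p.1, p.2))
      ∧ ∀ x : Int, (go_split n d).contains x = true → d ≤ x := by
  induction k generalizing d n with
  | zero =>
      have hd' : d = 16384 := by norm_num [hd]
      subst hd'
      by_cases h0 : n < 1
      · have hn0 : n = 0 := by omega
        subst hn0
        rw [go_split]
        simp [bitsLow, dict_empty_items, PySem.Dict.contains_empty]
      · rw [go_split, if_neg h0, if_pos rfl]
        constructor
        · rw [PySem.Dict.items_insert_of_not_contains _ _ (PySem.Dict.contains_empty _),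
              dict_empty_items, pow_zero, Int.ediv_one, if_pos (by omega : (1:Int) ≤ n)]
          simp [bitsLow]
        · intro x hx
          rw [PySem.Dict.contains_insert] at hx
          simp [PySem.Dict.contains_empty] at hx
          omega
  | succ k ih =>
      have hdlt : d < 16384 := by
        rw [hd]
        calc (2:Int) ^ (14 - (k + 1)) < 2 ^ 14 :=
              pow_lt_pow_right₀ one_lt_two (by omega)
          _ = 16384 := by norm_num
      have hdpos : 0 < d := by rw [hd]; positivity
      by_cases h0 : n < 1
      · have hn0 : n = 0 := by omega
        subst hn0
        rw [go_split]
        simp [bitsLow_zero, dict_empty_items, PySem.Dict.contains_empty]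
      · have hd2 : d * 2 = 2 ^ (14 - k) := by
          rw [hd, ← pow_succ]
          congr 1
          omega
        have hfd : PySem.Int.floordiv n 2 = n / 2 :=
          PySem.Int.floordiv_eq_ediv_of_pos (by norm_num)
        obtain ⟨ihitems, ihmem⟩ := ih (by omega) (d * 2) hd2 (n / 2) (by omega)
        have hq : n / 2 / 2 ^ k = n / 2 ^ (k + 1) := by
          rw [Int.ediv_ediv_of_nonneg (by positivity), pow_succ']
        have hne16384 : d ≠ 16384 := by omega
        have hfresh : (go_split (n / 2) (d * 2)).contains d = false := by
          cases hcon : (go_split (n / 2) (d * 2)).contains d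
          · rfl
          · exact absurd (ihmem d hcon) (by omega)
        rw [go_split, if_neg h0, if_neg hne16384, hfd]
        by_cases hodd : PySem.Int.mod n 2 ≠ 0
        · have hodd' : n % 2 ≠ 0 := by
            rwa [PySem.Int.mod_eq_emod_of_pos (by norm_num)] at hodd
          simp only [if_pos hodd]
          constructor
          · rw [PySem.Dict.items_insert_of_not_contains _ _ hfresh, ihitems, hq, bitsLow,
                if_pos hodd']
            simp [List.map_map, Function.comp_def, mul_comm, mul_left_comm]
          · intro x hx
            rw [PySem.Dict.contains_insert] at hx
            rcases Bool.or_eq_true_iff.mp hx with hx | hx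
            · have : x = d := by simpa using hx
              omega
            · have := ihmem x hx
              omega
        · have hodd' : ¬ (n % 2 ≠ 0) := by
            rwa [PySem.Int.mod_eq_emod_of_pos (by norm_num)] at hodd
          simp only [if_neg hodd]
          constructor
          · rw [ihitems, hq, bitsLow, if_neg hodd']
            simp [List.map_map, Function.comp_def, mul_comm, mul_left_comm]
          · intro x hx
            have := ihmem x hx
            omega

-- ===== VERDICT (by name: the statement is the Claim_ definition above) =====
theorem default_split_py_spec : Claim_equal_default_split_py := by
  intro amount _
  unfold Spec_default_split_py default_split_py default_split_py_alt
  rw [denomsA_eq, List.foldl_cons]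
  have h16384 : ((2:Int) ^ 14) = 16384 := by norm_num
  by_cases hlt : amount < 1
  · -- both sides are empty
    have hst : stepA (PySem.Dict.empty, amount) 16384 = (PySem.Dict.empty, amount) := by
      simp [stepA]; omega
    rw [hst, foldA_items 14 _ _ (by omega) (fun j _ => PySem.Dict.contains_empty _),
        entries_nil 14 amount (by omega)]
    rw [go_split, if_pos hlt]
    simp [dict_empty_items]
  · obtain ⟨hgo, -⟩ := go_split_items 14 (by omega) 1 (by norm_num) amount (by omega)
    have hmap1 : (bitsLow 14 amount).map (fun p => ((1:Int) * p.1, p.2)) = bitsLow 14 amount := by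
      simp
    rw [hgo, hmap1, h16384]
    by_cases hbig : amount ≥ 16384
    · -- top bucket fires on both sides
      have hq : PySem.Int.floordiv amount 16384 = amount / 16384 :=
        PySem.Int.floordiv_eq_ediv_of_pos (by norm_num)
      have hst : stepA (PySem.Dict.empty, amount) 16384
          = (PySem.Dict.empty.insert 16384 (amount / 16384), amount % 16384) := by
        simp only [stepA, ge_iff_le, if_pos hbig, hq, Prod.mk.injEq]
        exact ⟨trivial, by omega⟩
      have hd1 : ∀ j, j < 14 → (PySem.Dict.empty.insert (16384:Int) (amount / 16384)).contains ((2:Int) ^ j) = false := by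
        intro j hj
        rw [PySem.Dict.contains_insert]
        have : ((2:Int) ^ j) ≠ 16384 := by rw [← h16384]; exact pow_ne_pow_of_lt hj
        simp [this, PySem.Dict.contains_empty]
      rw [hst, foldA_items 14 _ _ (by omega) hd1,
          PySem.Dict.items_insert_of_not_contains _ _ (PySem.Dict.contains_empty _)]
      have hbits := entries_eq_bitsLow 14 amount (by omega)
      rw [h16384, show amount % 16384 = amount % 16384 from rfl] at hbits
      rw [hbits, if_pos (by omega : 1 ≤ amount / 16384)]
      simp [dict_empty_items]
    · -- amount in [1, 16383]: no top bucket on either side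
      have hst : stepA (PySem.Dict.empty, amount) 16384 = (PySem.Dict.empty, amount) := by
        simp [stepA]; omega
      rw [hst, foldA_items 14 _ _ (by omega) (fun j _ => PySem.Dict.contains_empty _)]
      have hbits := entries_eq_bitsLow 14 amount (by omega)
      rw [h16384, show amount % 16384 = amount by omega] at hbits
      rw [hbits, if_neg (by omega : ¬ (1 ≤ amount / 16384))]
      simp [dict_empty_items]
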